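-- pv_equiv track=rewrite | github.com/SamAllegretto/customer-insights-pipeline | src/agents/llm_agent.py | _parse_single_tag
-- ===== SOURCE A (Python) =====
-- from typing import List, Dict, Union
--
-- def _parse_single_tag(response: str, categories: List[str]) -> str:
--     """Parse LLM response as single tag."""
--     # Clean response
--     response = response.strip('"\'')
--
--     # Direct match
--     if response in categories:
--         return response
--
--     # Case-insensitive match
--     for cat in categories:
--         if cat.lower() == response.lower():
--             return cat
--
--     # Partial match
--     response_lower = response.lower()
--     for cat in categories:
--         if cat.lower() in response_lower or response_lower in cat.lower():
--             return cat
--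
--     return "Uncategorized"
-- ===== SOURCE B (Python) =====
-- def _parse_single_tag(response, categories):
--     """Single pass: rank each category (0 exact, 1 case-fold, 2 substring) and
--     keep the first category at the best (lowest) rank seen."""
--     response = response.strip('"\'')
--     response_lower = response.lower()
--     best = None
--     best_p = 3
--     for cat in categories:
--         if cat == response:
--             return cat  # rank 0 is unbeatable: stop immediately
--         cat_lower = cat.lower()
--         if cat_lower == response_lower:
--             p = 1
--         elif cat_lower in response_lower or response_lower in cat_lower:
--             p = 2
--         else:
--             continue
--         if p < best_p:
--             best_p = p
--             best = cat
--     return best if best is not None else "Uncategorized"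
-- ===== Notes on version B (the rewrite author's own statement) =====
-- stated objective: alternative
-- what changed: A's three sequential scans (exact membership, case-insensitive scan, bidirectional-substring scan) are replaced by a single pass that ranks each category (0 exact, 1 case-fold, 2 substring) and keeps the first category of strictly minimal rank, breaking early on an exact match.
import Mathlib
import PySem

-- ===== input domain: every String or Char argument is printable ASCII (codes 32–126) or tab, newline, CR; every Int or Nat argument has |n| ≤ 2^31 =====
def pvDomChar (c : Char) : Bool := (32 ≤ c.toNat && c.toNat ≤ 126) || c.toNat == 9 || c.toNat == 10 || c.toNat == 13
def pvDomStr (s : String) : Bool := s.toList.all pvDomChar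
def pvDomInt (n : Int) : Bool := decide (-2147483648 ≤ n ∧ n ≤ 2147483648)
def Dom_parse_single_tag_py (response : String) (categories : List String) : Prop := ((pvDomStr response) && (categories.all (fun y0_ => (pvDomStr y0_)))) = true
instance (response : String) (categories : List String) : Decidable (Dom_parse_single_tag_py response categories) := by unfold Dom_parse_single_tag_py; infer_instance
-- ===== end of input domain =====

-- B replaces A's three sequential scans by ONE pass that ranks each category
-- (0 exact / 1 case-fold / 2 substring) and keeps the first category of minimal
-- rank; objective: alternative (same asymptotic cost, single traversal).

-- ===== PORT A =====
def parse_single_tag_py (response : String) (categories : List String) : String :=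
  let r := PySem.Str.stripChars response "\"'"
  if categories.contains r then r
  else
    match categories.find? (fun cat => PySem.Str.lower cat == PySem.Str.lower r) with
    | some cat => cat
    | none =>
      let response_lower := PySem.Str.lower r
      match categories.find?
          (fun cat => PySem.Str.isIn (PySem.Str.lower cat) response_lower
                     || PySem.Str.isIn response_lower (PySem.Str.lower cat)) with
      | some cat => cat
      | none => "Uncategorized"

-- ===== PORT B =====
-- the single-pass loop of Source B: state = (best_p, best)
def pvAltLoop (r rl : String) : List String → Nat → Option String → Option String
  | [], _, best => best
  | cat :: rest, best_p, best =>
    if cat == r then some cat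
    else
      let cl := PySem.Str.lower cat
      if cl == rl then
        if 1 < best_p then pvAltLoop r rl rest 1 (some cat)
        else pvAltLoop r rl rest best_p best
      else if PySem.Str.isIn cl rl || PySem.Str.isIn rl cl then
        if 2 < best_p then pvAltLoop r rl rest 2 (some cat)
        else pvAltLoop r rl rest best_p best
      else pvAltLoop r rl rest best_p best

def parse_single_tag_py_alt (response : String) (categories : List String) : String :=
  let r := PySem.Str.stripChars response "\"'"
  let rl := PySem.Str.lower r
  match pvAltLoop r rl categories 3 none with
  | some c => c
  | none => "Uncategorized"

-- ===== PRECONDITION & SPEC =====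
def Spec_parse_single_tag_py (response : String) (categories : List String) (out : String) : Prop := out = parse_single_tag_py_alt response categories
instance (response : String) (categories : List String) (out : String) : Decidable (Spec_parse_single_tag_py response categories out) := by unfold Spec_parse_single_tag_py; infer_instance

-- ===== CLAIM (what is proved, stated in full; the proofs are below) =====
def Claim_equal_parse_single_tag_py : Prop := ∀ (response : String) (categories : List String), Dom_parse_single_tag_py response categories → Spec_parse_single_tag_py response categories (parse_single_tag_py response categories)

-- ===== LEMMAS AND PROOFS =====

-- shorthands for the three tests, used only by the proofs
def pvP0 (r : String) (cat : String) : Bool := cat == r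
def pvP1 (rl : String) (cat : String) : Bool := PySem.Str.lower cat == rl
def pvP2 (rl : String) (cat : String) : Bool :=
  PySem.Str.isIn (PySem.Str.lower cat) rl || PySem.Str.isIn rl (PySem.Str.lower cat)

-- state best_p = 1: only an exact match can still improve
theorem pvAltLoop_one (r rl : String) (l : List String) (c : String) :
    pvAltLoop r rl l 1 (some c) = some ((l.find? (pvP0 r)).getD c) := by
  induction l generalizing c with
  | nil => rfl
  | cons cat rest ih =>
    by_cases h0 : (cat == r) = true
    · rw [List.find?_cons_of_pos (p := pvP0 r) h0]
      simp only [pvAltLoop, if_pos h0, Option.getD_some]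
    · rw [List.find?_cons_of_neg (p := pvP0 r) h0]
      simp only [pvAltLoop, if_neg h0]
      split_ifs <;> first | omega | exact ih c

-- state best_p = 2 with a rank-2 best already stored
theorem pvAltLoop_two (r rl : String) (l : List String) (c : String) :
    pvAltLoop r rl l 2 (some c) =
      some (match l.find? (pvP0 r) with
            | some x => x
            | none => (l.find? (pvP1 rl)).getD c) := by
  induction l generalizing c with
  | nil => rfl
  | cons cat rest ih =>
    by_cases h0 : (cat == r) = true
    · rw [List.find?_cons_of_pos (p := pvP0 r) h0]
      simp only [pvAltLoop, if_pos h0]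
    · rw [List.find?_cons_of_neg (p := pvP0 r) h0]
      by_cases h1 : (PySem.Str.lower cat == rl) = true
      · rw [List.find?_cons_of_pos (p := pvP1 rl) h1]
        simp only [pvAltLoop, if_neg h0, if_pos h1, show (1:Nat) < 2 from by omega,
          if_pos, pvAltLoop_one]
        cases rest.find? (pvP0 r) <;> rfl
      · rw [List.find?_cons_of_neg (p := pvP1 rl) h1]
        simp only [pvAltLoop, if_neg h0, if_neg h1]
        split_ifs <;> first | omega | exact ih c

-- the initial state
theorem pvAltLoop_start (r rl : String) (l : List String) :
    pvAltLoop r rl l 3 none =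
      match l.find? (pvP0 r) with
      | some x => some x
      | none =>
        match l.find? (pvP1 rl) with
        | some y => some y
        | none =>
          match l.find? (pvP2 rl) with
          | some z => some z
          | none => none := by
  induction l with
  | nil => rfl
  | cons cat rest ih =>
    by_cases h0 : (cat == r) = true
    · rw [List.find?_cons_of_pos (p := pvP0 r) h0]
      simp only [pvAltLoop, if_pos h0]
    · rw [List.find?_cons_of_neg (p := pvP0 r) h0]
      by_cases h1 : (PySem.Str.lower cat == rl) = true
      · rw [List.find?_cons_of_pos (p := pvP1 rl) h1]
        simp only [pvAltLoop, if_neg h0, if_pos h1, show (1:Nat) < 3 from by omega,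
          if_pos, pvAltLoop_one]
        cases rest.find? (pvP0 r) <;> rfl
      · rw [List.find?_cons_of_neg (p := pvP1 rl) h1]
        by_cases h2 : (PySem.Str.isIn (PySem.Str.lower cat) rl
                      || PySem.Str.isIn rl (PySem.Str.lower cat)) = true
        · rw [List.find?_cons_of_pos (p := pvP2 rl) h2]
          simp only [pvAltLoop, if_neg h0, if_neg h1, if_pos h2,
            show (2:Nat) < 3 from by omega, if_pos, pvAltLoop_two]
          cases rest.find? (pvP0 r) <;> cases rest.find? (pvP1 rl) <;> rfl
        · rw [List.find?_cons_of_neg (p := pvP2 rl) h2]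
          simp only [pvAltLoop, if_neg h0, if_neg h1, if_neg h2]
          exact ih

theorem pv_find0_contains (r : String) (l : List String) :
    l.contains r = (l.find? (pvP0 r)).isSome := by
  induction l with
  | nil => rfl
  | cons cat rest ih =>
    by_cases h : cat = r
    · subst h
      rw [List.find?_cons_of_pos (p := pvP0 cat) (by simp [pvP0])]
      simp
    · rw [List.find?_cons_of_neg (p := pvP0 r) (by simp [pvP0, h])]
      rw [List.contains_cons, ← ih]
      simp [Ne.symm h]

-- both ports, after reducing their lets, as one statement about r
theorem pv_main (r : String) (l : List String) :
    (if l.contains r then r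
     else
       match l.find? (fun cat => PySem.Str.lower cat == PySem.Str.lower r) with
       | some cat => cat
       | none =>
         match l.find?
             (fun cat => PySem.Str.isIn (PySem.Str.lower cat) (PySem.Str.lower r)
                        || PySem.Str.isIn (PySem.Str.lower r) (PySem.Str.lower cat)) with
         | some cat => cat
         | none => "Uncategorized")
    = (match pvAltLoop r (PySem.Str.lower r) l 3 none with
       | some c => c
       | none => "Uncategorized") := by
  have e1 : (fun cat => PySem.Str.lower cat == PySem.Str.lower r) = pvP1 (PySem.Str.lower r) := rfl
  have e2 : (fun cat => PySem.Str.isIn (PySem.Str.lower cat) (PySem.Str.lower r)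
                       || PySem.Str.isIn (PySem.Str.lower r) (PySem.Str.lower cat))
            = pvP2 (PySem.Str.lower r) := rfl
  rw [pvAltLoop_start, pv_find0_contains, e1, e2]
  cases hx : l.find? (pvP0 r) with
  | some x =>
    have hxr : x = r := by
      have := List.find?_some hx
      simpa [pvP0] using this
    simp [hxr]
  | none =>
    simp only [Option.isSome_none, Bool.false_eq_true, if_false]
    cases h1 : l.find? (pvP1 (PySem.Str.lower r)) with
    | some y => rfl
    | none => cases h2 : l.find? (pvP2 (PySem.Str.lower r)) <;> rfl

-- ===== VERDICT (by name: the statement is the Claim_ definition above) =====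
theorem parse_single_tag_py_spec : Claim_equal_parse_single_tag_py := by
  intro response categories _
  unfold Spec_parse_single_tag_py parse_single_tag_py parse_single_tag_py_alt
  exact pv_main (PySem.Str.stripChars response "\"'") categories
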